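-- pv_equiv track=rewrite | github.com/jqk4388/mangaTextFormatter | ComicLex_v1.3.py | parse_clipboard_content_lines
-- ===== SOURCE A (Python) =====
-- def parse_clipboard_content_lines(content):
--     text_boxes = []
--     current = []
--     for line in content.split('\n'):
--         stripped_line = line.strip()
--         if not stripped_line:
--             if current:
--                 text_boxes.append('\n'.join(current))
--                 current = []
--         else:
--             current.append(line.rstrip('\n'))
--     if current:
--         text_boxes.append('\n'.join(current))
--     return text_boxes
-- ===== SOURCE B (Python) =====
-- def parse_clipboard_content_lines(content):
--     lines = content.split('\n')
--     blanks = [i for i, line in enumerate(lines) if not line.strip()]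
--     bounds = [-1] + blanks + [len(lines)]
--     boxes = []
--     for a, b in zip(bounds, bounds[1:]):
--         box = lines[a + 1:b]
--         if box:
--             boxes.append('\n'.join(box))
--     return boxes
-- ===== Notes on version B (the rewrite author's own statement) =====
-- stated objective: alternative
-- what changed: Instead of a single accumulate-and-flush pass with a running buffer, B first indexes the positions of all blank lines, then slices the line list between consecutive blank positions and joins the non-empty slices.
import Mathlib
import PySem

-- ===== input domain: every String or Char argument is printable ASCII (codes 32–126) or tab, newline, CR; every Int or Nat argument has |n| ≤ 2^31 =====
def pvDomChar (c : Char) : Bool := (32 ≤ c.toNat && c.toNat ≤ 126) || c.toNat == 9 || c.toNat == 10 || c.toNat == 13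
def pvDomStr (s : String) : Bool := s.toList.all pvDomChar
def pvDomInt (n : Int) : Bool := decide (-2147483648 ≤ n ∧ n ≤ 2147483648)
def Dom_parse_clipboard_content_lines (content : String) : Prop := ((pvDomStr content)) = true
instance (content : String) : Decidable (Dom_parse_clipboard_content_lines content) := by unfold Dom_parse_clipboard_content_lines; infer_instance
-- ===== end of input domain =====

-- B replaces A's accumulate-and-flush buffer loop by first indexing the blank-line positions
-- and then slicing the line list between consecutive blank positions (objective: alternative).


-- ===== PORT A =====
-- hand port of line.rstrip('\n') (PySem has no single-sided stripChars): drop trailing '\n' chars; exact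
def pvRstripNl (s : String) : String :=
  String.ofList ((s.toList.reverse.dropWhile (fun c => c == '\n')).reverse)

-- content.split('\n'): sep is nonempty, so split? always returns some
def pvLines (content : String) : List String := (PySem.Str.split? content "\n").getD []

def pvStepA (st : List String × List String) (line : String) : List String × List String :=
  let stripped := PySem.Str.strip line
  if stripped == "" then
    if st.2.isEmpty then st else (st.1 ++ [PySem.Str.join "\n" st.2], [])
  else
    (st.1, st.2 ++ [pvRstripNl line])

def parse_clipboard_content_lines (content : String) : List String :=
  let st := (pvLines content).foldl pvStepA ([], [])
  if st.2.isEmpty then st.1 else st.1 ++ [PySem.Str.join "\n" st.2]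

-- ===== PORT B =====
def parse_clipboard_content_lines_alt (content : String) : List String :=
  let lines := pvLines content
  let blanks := ((PySem.List.enumerate lines 0).filter
      (fun p => PySem.Str.strip p.2 == "")).map (·.1)
  let bounds := -1 :: blanks ++ [(lines.length : Int)]
  (bounds.zip bounds.tail).foldl
    (fun boxes ab =>
      let box := PySem.List.slice lines (some (ab.1 + 1)) (some ab.2)
      if box.isEmpty then boxes else boxes ++ [PySem.Str.join "\n" box]) []

-- ===== PRECONDITION & SPEC =====
def Spec_parse_clipboard_content_lines (content : String) (out : List String) : Prop := out = parse_clipboard_content_lines_alt content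
instance (content : String) (out : List String) : Decidable (Spec_parse_clipboard_content_lines content out) := by unfold Spec_parse_clipboard_content_lines; infer_instance

-- ===== CLAIM (what is proved, stated in full; the proofs are below) =====
def Claim_equal_parse_clipboard_content_lines : Prop := ∀ (content : String), Dom_parse_clipboard_content_lines content → Spec_parse_clipboard_content_lines content (parse_clipboard_content_lines content)

-- ===== LEMMAS AND PROOFS =====

def pvKey (l : String) : Bool := !(PySem.Str.strip l == "")

-- common reference point of the two proofs: the maximal runs of consecutive non-blank lines
def pvBlocks : List String → List (List String)
  | [] => []
  | l :: ls =>
      if pvKey l then (l :: ls.takeWhile pvKey) :: pvBlocks (ls.dropWhile pvKey)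
      else pvBlocks ls
termination_by ls => ls.length
decreasing_by
  · simpa using Nat.lt_succ_of_le (List.length_dropWhile_le _ _)
  · simp

def pvBalt (lines : List String) : List String :=
  (pvBlocks lines).map (PySem.Str.join "\n")

-- ---------- A-side: the flush loop computes pvBalt ----------

-- every piece produced by splitting on '\n' contains no '\n'
lemma pv_go_no_nl : ∀ (fuel : Nat) (l cur : List Char) (acc : List (List Char)),
    l.length < fuel → ('\n' ∉ cur) → (∀ p ∈ acc, '\n' ∉ p) →
    ∀ p ∈ PySem.Chars.splitOn.go ['\n'] fuel l cur acc, '\n' ∉ p := by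
  intro fuel
  induction fuel with
  | zero => intro l cur acc h; omega
  | succ n ih =>
    intro l cur acc hlen hcur hacc p hp
    cases l with
    | nil =>
      rw [PySem.Chars.splitOn.go.eq_def] at hp
      simp at hp
      rcases hp with h | rfl
      · exact hacc _ h
      · simpa using hcur
    | cons c rest =>
      have hp' : p ∈ (if ['\n'].isPrefixOf (c :: rest) = true then
            PySem.Chars.splitOn.go ['\n'] n (List.drop ['\n'].length (c :: rest)) [] (cur.reverse :: acc)
          else PySem.Chars.splitOn.go ['\n'] n rest (c :: cur) acc) := hp
      clear hp
      by_cases hc : c = '\n'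
      · subst hc
        rw [if_pos (by simp)] at hp'
        refine ih (List.drop ['\n'].length ('\n' :: rest)) [] (cur.reverse :: acc)
          ?_ List.not_mem_nil ?_ p hp'
        · simp only [List.length_drop, List.length_cons]
          simp only [List.length_cons] at hlen
          omega
        · intro q hq
          rcases List.mem_cons.mp hq with h | h
          · subst h; simpa using hcur
          · exact hacc _ h
      · rw [if_neg (by simpa [List.isPrefixOf] using fun h => hc h.symm)] at hp'
        refine ih _ _ _ (Nat.lt_of_succ_lt_succ hlen) ?_ hacc p hp'
        intro h
        rcases List.mem_cons.mp h with h | h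
        · exact hc h.symm
        · exact hcur h

lemma pv_lines_no_nl (content : String) :
    ∀ s ∈ pvLines content, '\n' ∉ s.toList := by
  intro s hs
  unfold pvLines PySem.Str.split? PySem.Chars.split? at hs
  simp at hs
  obtain ⟨p, hp, rfl⟩ := hs
  have : '\n' ∉ p :=
    pv_go_no_nl (content.toList.length + 1) content.toList [] [] (by omega) (by simp) (by simp)
      p (by simpa [PySem.Chars.splitOn] using hp)
  simpa using this

lemma pv_rstrip_noop (s : String) (h : '\n' ∉ s.toList) : pvRstripNl s = s := by
  unfold pvRstripNl
  have hd : s.toList.reverse.dropWhile (fun c => c == '\n') = s.toList.reverse :=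
    List.dropWhile_eq_self_iff.mpr (by
      intro hl
      have hm : s.toList.reverse[0] ∈ s.toList := List.mem_reverse.mp (List.getElem_mem hl)
      simp only [beq_iff_eq]
      intro he
      exact h (he ▸ hm))
  rw [hd, List.reverse_reverse, String.ofList_toList]

def pvFin (st : List String × List String) : List String :=
  if st.2.isEmpty then st.1 else st.1 ++ [PySem.Str.join "\n" st.2]

lemma pv_main : ∀ (n : Nat) (lines : List String), lines.length ≤ n →
    (∀ s ∈ lines, pvRstripNl s = s) →
    (∀ boxes, pvFin (lines.foldl pvStepA (boxes, [])) = boxes ++ pvBalt lines) ∧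
    (∀ boxes cur, cur ≠ [] →
      pvFin (lines.foldl pvStepA (boxes, cur)) =
        boxes ++ PySem.Str.join "\n" (cur ++ lines.takeWhile pvKey) ::
          pvBalt (lines.dropWhile pvKey)) := by
  intro n
  induction n with
  | zero =>
    intro lines hlen _
    have h0 : lines = [] := List.eq_nil_of_length_eq_zero (Nat.le_zero.mp hlen)
    subst h0
    constructor
    · intro boxes; simp [pvFin, pvBalt, pvBlocks]
    · intro boxes cur hcur
      simp [pvFin, pvBalt, pvBlocks, List.isEmpty_eq_false_iff.mpr hcur]
  | succ n ih =>
    intro lines hlen hstrip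
    cases lines with
    | nil =>
      constructor
      · intro boxes; simp [pvFin, pvBalt, pvBlocks]
      · intro boxes cur hcur
        simp [pvFin, pvBalt, pvBlocks, List.isEmpty_eq_false_iff.mpr hcur]
    | cons l ls =>
      have hlen' : ls.length ≤ n := by simpa using Nat.lt_succ_iff.mp (by simpa using hlen)
      have hstrip' : ∀ s ∈ ls, pvRstripNl s = s := fun s hs => hstrip s (List.mem_cons_of_mem _ hs)
      have ihe := ih ls hlen' hstrip'
      by_cases hk : pvKey l = true
      · -- l non-blank
        have hstr : (PySem.Str.strip l == "") = false := by
          simpa [pvKey] using hk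
        constructor
        · intro boxes
          simp only [List.foldl_cons, pvStepA, hstr, Bool.false_eq_true, if_false, List.nil_append]
          rw [(ihe.2 boxes [pvRstripNl l] (by simp))]
          rw [hstrip l (List.mem_cons_self)]
          simp [pvBalt, pvBlocks, hk]
        · intro boxes cur hcur
          simp only [List.foldl_cons, pvStepA, hstr, Bool.false_eq_true, if_false]
          rw [(ihe.2 boxes (cur ++ [pvRstripNl l]) (by simp))]
          rw [hstrip l (List.mem_cons_self)]
          simp [hk]
      · -- l blank
        simp only [Bool.not_eq_true] at hk
        have hstr : (PySem.Str.strip l == "") = true := by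
          simpa [pvKey] using hk
        have hskip : pvBalt (l :: ls) = pvBalt ls := by
          simp [pvBalt, pvBlocks, hk]
        constructor
        · intro boxes
          simp only [List.foldl_cons, pvStepA, hstr, if_true, List.isEmpty_nil]
          rw [ihe.1 boxes, hskip]
        · intro boxes cur hcur
          simp only [List.foldl_cons, pvStepA, hstr, if_true,
            List.isEmpty_eq_false_iff.mpr hcur, Bool.false_eq_true, if_false]
          rw [ihe.1 (boxes ++ [PySem.Str.join "\n" cur])]
          simp [hk, hskip]

-- ---------- B-side: the blank-index/slice pipeline computes pvBalt ----------

def pvBlanks (lines : List String) : List Int :=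
  ((PySem.List.enumerate lines 0).filter (fun p => PySem.Str.strip p.2 == "")).map (·.1)

def pvBounds (lines : List String) : List Int :=
  -1 :: pvBlanks lines ++ [(lines.length : Int)]

def pvSeg (lines : List String) (ab : Int × Int) : List String :=
  PySem.List.slice lines (some (ab.1 + 1)) (some ab.2)

def pvBcore (lines : List String) : List String :=
  (((pvBounds lines).zip (pvBounds lines).tail).filter
      (fun ab => !(pvSeg lines ab).isEmpty)).map (fun ab => PySem.Str.join "\n" (pvSeg lines ab))

lemma pv_fold_swap (lines : List String) :
    ∀ (ps : List (Int × Int)) (acc : List String),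
      ps.foldl (fun boxes ab =>
          let box := PySem.List.slice lines (some (ab.1 + 1)) (some ab.2)
          if box.isEmpty then boxes else boxes ++ [PySem.Str.join "\n" box]) acc =
        acc ++ (ps.filter (fun ab => !(pvSeg lines ab).isEmpty)).map
          (fun ab => PySem.Str.join "\n" (pvSeg lines ab)) := by
  intro ps
  induction ps with
  | nil => intro acc; simp
  | cons ab ps ih =>
    intro acc
    by_cases h : (pvSeg lines ab).isEmpty = true
    · simp only [List.foldl_cons]
      rw [ih]
      simp [pvSeg] at h
      simp [pvSeg, h]
    · simp only [Bool.not_eq_true] at h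
      simp only [List.foldl_cons]
      rw [ih]
      have h' : (PySem.List.slice lines (some (ab.1 + 1)) (some ab.2)).isEmpty = false := h
      simp [pvSeg, h']

lemma pv_alt_eq_bcore (content : String) :
    parse_clipboard_content_lines_alt content = pvBcore (pvLines content) := by
  show ((pvBounds (pvLines content)).zip (pvBounds (pvLines content)).tail).foldl
      (fun boxes ab =>
        let box := PySem.List.slice (pvLines content) (some (ab.1 + 1)) (some ab.2)
        if box.isEmpty then boxes else boxes ++ [PySem.Str.join "\n" box]) [] = _
  rw [pv_fold_swap]
  simp [pvBcore]

-- enumerate from an arbitrary start is the shift of enumerate from 0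
lemma pv_enum_shift : ∀ (ls : List String) (s : Int),
    PySem.List.enumerate ls s =
      (PySem.List.enumerate ls 0).map (fun p => (p.1 + s, p.2)) := by
  intro ls
  induction ls with
  | nil => intro s; simp [PySem.List.enumerate_nil]
  | cons l ls ih =>
    intro s
    rw [PySem.List.enumerate_cons, PySem.List.enumerate_cons l ls 0, ih (s + 1), ih (0 + 1)]
    simp only [List.map_cons, List.map_map]
    refine congrArg₂ List.cons (by simp) ?_
    apply List.map_congr_left
    intro p _
    simp [Function.comp, Prod.ext_iff]
    omega

lemma pv_blanks_all_key (lines : List String) (h : ∀ s ∈ lines, pvKey s = true) :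
    pvBlanks lines = [] := by
  unfold pvBlanks
  rw [List.filter_eq_nil_iff.mpr, List.map_nil]
  intro p hp
  obtain ⟨k, hk, rfl⟩ := (PySem.List.mem_enumerate_iff _ _ _).mp hp
  have := h _ (List.getElem_mem hk)
  simpa [pvKey] using this

lemma pv_blanks_decomp (pre : List String) (d : String) (rest : List String)
    (hpre : ∀ s ∈ pre, pvKey s = true) (hd : pvKey d = false) :
    pvBlanks (pre ++ d :: rest) =
      (pre.length : Int) :: (pvBlanks rest).map (· + ((pre.length : Int) + 1)) := by
  unfold pvBlanks
  rw [PySem.List.enumerate_append, PySem.List.enumerate_cons]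
  have h1 : (PySem.List.enumerate pre 0).filter (fun p => PySem.Str.strip p.2 == "") = [] := by
    rw [List.filter_eq_nil_iff]
    intro p hp
    obtain ⟨k, hk, rfl⟩ := (PySem.List.mem_enumerate_iff _ _ _).mp hp
    have := hpre _ (List.getElem_mem hk)
    simpa [pvKey] using this
  have hd' : (PySem.Str.strip d == "") = true := by simpa [pvKey] using hd
  rw [List.filter_append, h1, List.nil_append, List.filter_cons]
  simp only [hd', if_true, List.map_cons]
  refine congrArg₂ List.cons (by simp) ?_
  rw [pv_enum_shift rest ((0 : Int) + pre.length + 1), List.filter_map,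
    show ((fun p : Int × String => PySem.Str.strip p.2 == "") ∘
        (fun p : Int × String => (p.1 + ((0 : Int) + pre.length + 1), p.2))) =
      (fun p : Int × String => PySem.Str.strip p.2 == "") from funext fun p => rfl,
    List.map_map, List.map_map]
  apply List.map_congr_left
  intro p _
  simp [Function.comp]
  try omega

-- every blank index is in [0, len)
lemma pv_blanks_bounds (lines : List String) :
    ∀ x ∈ pvBlanks lines, 0 ≤ x ∧ x < (lines.length : Int) := by
  intro x hx
  unfold pvBlanks at hx
  simp only [List.mem_map, List.mem_filter] at hx
  obtain ⟨p, ⟨hmem, _⟩, rfl⟩ := hx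
  obtain ⟨k, hk, rfl⟩ := (PySem.List.mem_enumerate_iff _ _ _).mp hmem
  constructor <;> simp <;> omega

lemma pv_bounds_lower (lines : List String) : ∀ x ∈ pvBounds lines, -1 ≤ x := by
  intro x hx
  unfold pvBounds at hx
  rcases List.mem_cons.mp hx with rfl | hx
  · omega
  · rcases List.mem_append.mp hx with h | h
    · exact le_of_lt (lt_of_lt_of_le (by omega) (pv_blanks_bounds lines x h).1)
    · simp at h; omega

lemma pv_bounds_tail_nonneg (lines : List String) : ∀ x ∈ (pvBounds lines).tail, 0 ≤ x := by
  intro x hx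
  unfold pvBounds at hx
  rcases List.mem_append.mp hx with h | h
  · exact (pv_blanks_bounds lines x h).1
  · simp at h; omega

-- slicing behind a removed prefix of length c
lemma pv_seg_shift (pre : List String) (d : String) (rest : List String)
    (a b : Int) (ha : 0 ≤ a) (hb : 0 ≤ b) :
    PySem.List.slice (pre ++ d :: rest)
        (some (a + ((pre.length : Int) + 1))) (some (b + ((pre.length : Int) + 1))) =
      PySem.List.slice rest (some a) (some b) := by
  rw [PySem.List.slice_toNat _ (by omega) (by omega), PySem.List.slice_toNat _ ha hb]
  have hA : (a + ((pre.length : Int) + 1)).toNat = (pre ++ [d]).length + a.toNat := by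
    simp; omega
  have hT : (b + ((pre.length : Int) + 1)).toNat - (a + ((pre.length : Int) + 1)).toNat =
      b.toNat - a.toNat := by omega
  rw [hT, hA, show pre ++ d :: rest = (pre ++ [d]) ++ rest by simp,
    List.drop_length_add_append]

-- decomposition of the bound list at the first blank line
lemma pv_bounds_decomp (pre : List String) (d : String) (rest : List String)
    (hpre : ∀ s ∈ pre, pvKey s = true) (hd : pvKey d = false) :
    pvBounds (pre ++ d :: rest) =
      -1 :: (pvBounds rest).map (· + ((pre.length : Int) + 1)) := by
  unfold pvBounds
  rw [pv_blanks_decomp pre d rest hpre hd,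
    show (((pre ++ d :: rest).length : Nat) : Int) =
      (rest.length : Int) + ((pre.length : Int) + 1) by simp; ring]
  simp only [List.map_cons, List.map_append, List.map_nil, List.cons_append]
  congr 2
  omega

-- the pair list decomposes the same way
lemma pv_pairs_decomp (pre : List String) (d : String) (rest : List String)
    (hpre : ∀ s ∈ pre, pvKey s = true) (hd : pvKey d = false) :
    ((pvBounds (pre ++ d :: rest)).zip (pvBounds (pre ++ d :: rest)).tail) =
      (-1, (pre.length : Int)) ::
        ((pvBounds rest).zip (pvBounds rest).tail).map
          (Prod.map (· + ((pre.length : Int) + 1)) (· + ((pre.length : Int) + 1))) := by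
  rw [pv_bounds_decomp pre d rest hpre hd]
  have hB : pvBounds rest = -1 :: (pvBlanks rest ++ [(rest.length : Int)]) := rfl
  rw [hB, ← List.zip_map]
  simp only [List.map_cons, List.tail_cons, List.zip_cons_cons]
  refine congrArg₂ List.cons ?_ rfl
  simp

lemma pv_bcore_eq : ∀ (n : Nat) (lines : List String), lines.length ≤ n →
    pvBcore lines = pvBalt lines := by
  intro n
  induction n with
  | zero =>
    intro lines hlen
    have h0 : lines = [] := List.eq_nil_of_length_eq_zero (Nat.le_zero.mp hlen)
    subst h0
    simp [pvBcore, pvBounds, pvBlanks, pvSeg, pvBalt, pvBlocks, PySem.List.enumerate_nil,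
      PySem.List.slice]
  | succ n ih =>
    intro lines hlen
    cases hsuf : lines.dropWhile pvKey with
    | nil =>
      -- no blank line at all: one segment, the whole list
      have hall : ∀ s ∈ lines, pvKey s = true := by
        have := List.dropWhile_eq_nil_iff.mp hsuf
        intro s hs; exact this s hs
      have hb : pvBlanks lines = [] := pv_blanks_all_key lines hall
      have hseg : pvSeg lines (-1, (lines.length : Int)) = lines := by
        unfold pvSeg
        rw [show (-1 : Int) + 1 = ((0 : Nat) : Int) by omega,
          PySem.List.slice_natCast]
        simp
      cases lines with
      | nil => simp [pvBcore, pvBounds, hb, pvSeg, pvBalt, pvBlocks, PySem.List.slice]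
      | cons l ls =>
        have hkl : pvKey l = true := hall l List.mem_cons_self
        have hseg2 : pvSeg (l :: ls) (-1, (ls.length : Int) + 1) = l :: ls := by
          unfold pvSeg
          rw [show (-1 : Int) + 1 = ((0 : Nat) : Int) by omega,
            show (ls.length : Int) + 1 = (((ls.length + 1 : Nat)) : Int) by push_cast; ring,
            PySem.List.slice_natCast]
          simp
        have hts : ls.takeWhile pvKey = ls := by
          have hdw : ls.dropWhile pvKey = [] := by
            rw [List.dropWhile_cons, if_pos hkl] at hsuf
            exact hsuf
          have := List.takeWhile_append_dropWhile (p := pvKey) (l := ls)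
          rw [hdw, List.append_nil] at this
          exact this
        have hds : ls.dropWhile pvKey = [] := by
          rw [List.dropWhile_cons, if_pos hkl] at hsuf
          exact hsuf
        unfold pvBcore
        rw [show pvBounds (l :: ls) = [-1, (ls.length : Int) + 1] by
          unfold pvBounds
          rw [hb]
          simp]
        simp only [List.tail_cons, List.zip_cons_cons, List.zip_nil_right]
        rw [List.filter_cons, List.filter_nil]
        simp [hseg2, pvBalt, pvBlocks, hkl, hts, hds]
    | cons d rest =>
      -- first blank line found: first segment is the non-blank prefix, recurse on the rest
      have hd : pvKey d = false := by
        have h2 := List.dropWhile_get_zero_not pvKey lines (by rw [hsuf]; simp)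
        revert h2
        generalize hq : lines.dropWhile pvKey = q at hsuf ⊢
        subst hsuf; simp
      have hpre : ∀ s ∈ lines.takeWhile pvKey, pvKey s = true := by
        intro s hs; exact List.mem_takeWhile_imp hs
      have hsplit : lines = lines.takeWhile pvKey ++ d :: rest := by
        conv_lhs => rw [← List.takeWhile_append_dropWhile (p := pvKey) (l := lines)]
        rw [hsuf]
      obtain ⟨pre, hpredef⟩ : ∃ p, lines.takeWhile pvKey = p := ⟨_, rfl⟩
      rw [hpredef] at hsplit hpre
      have hlenr : rest.length ≤ n := by
        have : lines.length = pre.length + 1 + rest.length := by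
          rw [hsplit]; simp; omega
        omega
      have ihr := ih rest hlenr
      have hc : ∀ ab ∈ ((pvBounds rest).zip (pvBounds rest).tail),
          pvSeg (pre ++ d :: rest)
              (Prod.map (· + ((pre.length : Int) + 1)) (· + ((pre.length : Int) + 1)) ab) =
            pvSeg rest ab := by
        intro ab hab
        obtain ⟨a1, a2⟩ := ab
        have hm := List.of_mem_zip hab
        have h1 : -1 ≤ a1 := pv_bounds_lower rest a1 hm.1
        have h2 : 0 ≤ a2 := pv_bounds_tail_nonneg rest a2 hm.2
        unfold pvSeg
        simp only [Prod.map]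
        rw [show a1 + ((pre.length : Int) + 1) + 1 = (a1 + 1) + ((pre.length : Int) + 1) by ring]
        exact pv_seg_shift pre d rest (a1 + 1) a2 (by omega) h2
      have hseg0 : pvSeg (pre ++ d :: rest) (-1, (pre.length : Int)) = pre := by
        unfold pvSeg
        rw [show (-1 : Int) + 1 = ((0 : Nat) : Int) by omega, PySem.List.slice_natCast]
        simp
      -- compute pvBcore on the decomposed list
      rw [hsplit]
      unfold pvBcore
      rw [pv_pairs_decomp pre d rest hpre hd]
      rw [List.filter_cons]
      have hmapseg :
          List.map (fun ab => PySem.Str.join "\n" (pvSeg (pre ++ d :: rest) ab))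
            (List.filter (fun ab => !(pvSeg (pre ++ d :: rest) ab).isEmpty)
              (((pvBounds rest).zip (pvBounds rest).tail).map
                (Prod.map (· + ((pre.length : Int) + 1)) (· + ((pre.length : Int) + 1))))) =
            pvBcore rest := by
        rw [List.filter_map, List.map_map]
        unfold pvBcore
        rw [List.filter_congr (fun ab hab => by
          simp only [Function.comp]
          rw [hc ab hab])]
        apply List.map_congr_left
        intro ab hab
        simp only [Function.comp]
        rw [hc ab (List.mem_of_mem_filter hab)]
      by_cases hpe : pre = []
      · subst hpe
        rw [hseg0]
        simp only [List.isEmpty_nil, Bool.not_true, Bool.false_eq_true, if_false]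
        rw [hmapseg, ihr]
        simp [pvBalt, pvBlocks, hd]
      · have hpe' : pre.isEmpty = false := by
          cases pre with
          | nil => exact absurd rfl hpe
          | cons p ps => rfl
        rw [hseg0, hpe']
        simp only [Bool.not_false, if_true, List.map_cons]
        rw [hmapseg, ihr]
        -- pvBalt (pre ++ d :: rest) = join pre :: pvBalt rest
        cases pre with
        | nil => exact absurd rfl hpe
        | cons p ps =>
          have hkp : pvKey p = true := hpre p List.mem_cons_self
          have hps : ∀ s ∈ ps, pvKey s = true := fun s hs => hpre s (List.mem_cons_of_mem _ hs)
          have htw : (ps ++ d :: rest).takeWhile pvKey = ps := by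
            rw [List.takeWhile_append_of_pos hps, List.takeWhile_cons]
            simp [hd]
          have hdw : (ps ++ d :: rest).dropWhile pvKey = d :: rest := by
            rw [List.dropWhile_append_of_pos hps, List.dropWhile_cons]
            simp [hd]
          have hseg0' : pvSeg (p :: (ps ++ d :: rest)) (-1, (ps.length : Int) + 1) = p :: ps := by
            have h := hseg0
            simp only [List.cons_append, List.length_cons] at h
            push_cast at h
            exact h
          simp [pvBalt, pvBlocks, hkp, htw, hdw, hd, hseg0']

-- ===== VERDICT (by name: the statement is the Claim_ definition above) =====
theorem parse_clipboard_content_lines_spec : Claim_equal_parse_clipboard_content_lines := by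
  intro content _
  unfold Spec_parse_clipboard_content_lines parse_clipboard_content_lines
  have hstrip : ∀ s ∈ pvLines content, pvRstripNl s = s := fun s hs =>
    pv_rstrip_noop s (pv_lines_no_nl content s hs)
  have h := (pv_main (pvLines content).length (pvLines content) le_rfl hstrip).1 []
  rw [pv_alt_eq_bcore, pv_bcore_eq (pvLines content).length _ le_rfl]
  simpa [pvFin] using h
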